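-- pv_equiv track=rewrite | github.com/Alleyfoo/Oppisopimushaku | src/apprscan/jobs/ats/greenhouse.py | detect_greenhouse
-- ===== SOURCE A (Python) =====
-- from typing import Dict, List, Optional, Tuple
--
-- def detect_greenhouse(url: str, html: str) -> Optional[Dict[str, str]]:
--     if "greenhouse.io" in url or "boards.greenhouse.io" in html:
--         parts = url.split("/")
--         token = None
--         for i, part in enumerate(parts):
--             if "greenhouse" in part and i + 1 < len(parts):
--                 token = parts[i + 1]
--                 break
--         return {"kind": "greenhouse", "slug": token}
--     return None
-- ===== SOURCE B (Python) =====
-- def detect_greenhouse(url: str, html: str):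
--     if "greenhouse.io" in url or "boards.greenhouse.io" in html:
--         token = None
--         i = url.find("greenhouse")
--         if i != -1:
--             j = url.find("/", i)
--             if j != -1:
--                 k = url.find("/", j + 1)
--                 token = url[j + 1:] if k == -1 else url[j + 1:k]
--         return {"kind": "greenhouse", "slug": token}
--     return None
-- ===== Notes on version B (the rewrite author's own statement) =====
-- stated objective: alternative
-- what changed: A splits the URL into segments and scans them with an enumerate loop; B never splits: it locates the first 'greenhouse' occurrence with str.find, then the next '/' and the '/' after that, and slices the token out of the raw string by index arithmetic.
import Mathlib
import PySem

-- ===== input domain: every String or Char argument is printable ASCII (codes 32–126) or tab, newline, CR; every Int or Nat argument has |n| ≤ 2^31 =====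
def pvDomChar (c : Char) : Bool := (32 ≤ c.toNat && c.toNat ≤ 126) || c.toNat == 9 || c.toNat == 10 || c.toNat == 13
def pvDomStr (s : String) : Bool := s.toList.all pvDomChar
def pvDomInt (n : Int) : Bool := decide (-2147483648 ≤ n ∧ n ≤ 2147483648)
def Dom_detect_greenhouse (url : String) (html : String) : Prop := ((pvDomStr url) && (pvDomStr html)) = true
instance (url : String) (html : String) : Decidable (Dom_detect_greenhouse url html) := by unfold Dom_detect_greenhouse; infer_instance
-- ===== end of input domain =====

-- B drops the split/enumerate pass entirely: it locates the token by raw index arithmetic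
-- (find "greenhouse", then the next '/', then the '/' after that, and slices); objective: alternative.


-- ===== PORT A =====
-- A's 'for i, part in enumerate(parts): if "greenhouse" in part and i+1 < len(parts): token = parts[i+1]; break'
def ghLoopA (parts : List String) : List (Int × String) → Option String
  | [] => none
  | (i, part) :: rest =>
    if PySem.Str.isIn "greenhouse" part && decide (i + 1 < (parts.length : Int)) then
      PySem.List.pyGet? parts (i + 1)
    else ghLoopA parts rest

def detect_greenhouse (url : String) (html : String) : Option (List (String × String)) :=
  if PySem.Str.isIn "greenhouse.io" url || PySem.Str.isIn "boards.greenhouse.io" html then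
    let parts := (PySem.Str.split? url "/").getD []
    let token := ghLoopA parts (PySem.List.enumerate parts)
    -- when token is none the Python slug is None (not a str); such inputs are outside Pre_, "" stands in
    some [("kind", "greenhouse"), ("slug", token.getD "")]
  else none

-- ===== PORT B =====
-- i = url.find("greenhouse"); j = url.find("/", i); k = url.find("/", j+1); token = url[j+1:] / url[j+1:k]
def detect_greenhouse_alt (url : String) (html : String) : Option (List (String × String)) :=
  if PySem.Str.isIn "greenhouse.io" url || PySem.Str.isIn "boards.greenhouse.io" html then
    let i := PySem.Str.find url "greenhouse"
    let token : Option String :=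
      if i ≠ -1 then
        let j := PySem.Str.findFrom url "/" i
        if j ≠ -1 then
          let k := PySem.Str.findFrom url "/" (j + 1)
          some (if k = -1 then PySem.Str.slice url (some (j + 1)) none
                else PySem.Str.slice url (some (j + 1)) (some k))
        else none
      else none
    some [("kind", "greenhouse"), ("slug", token.getD "")]
  else none

-- ===== PRECONDITION & SPEC =====
-- Pre_ excludes inputs where the guard fires but no non-final URL segment contains "greenhouse":
-- there Python A (and B) returns {"slug": None}, a value of the wrong declared type (None, not a str).
def Pre_detect_greenhouse (url : String) (html : String) : Prop :=
  (PySem.Str.isIn "greenhouse.io" url || PySem.Str.isIn "boards.greenhouse.io" html) = true →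
  (((PySem.Str.split? url "/").getD []).dropLast.any (fun p => PySem.Str.isIn "greenhouse" p)) = true
instance (url : String) (html : String) : Decidable (Pre_detect_greenhouse url html) := by
  unfold Pre_detect_greenhouse; infer_instance

def pvWitness_detect_greenhouse : String × String := ("https://boards.greenhouse.io/acme", "")

def Spec_detect_greenhouse (url : String) (html : String) (out : Option (List (String × String))) : Prop := out = detect_greenhouse_alt url html
instance (url : String) (html : String) (out : Option (List (String × String))) : Decidable (Spec_detect_greenhouse url html out) := by unfold Spec_detect_greenhouse; infer_instance

-- ===== CLAIM (what is proved, stated in full; the proofs are below) =====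
def Claim_equal_detect_greenhouse : Prop := ∀ (url : String) (html : String), Dom_detect_greenhouse url html → Pre_detect_greenhouse url html → Spec_detect_greenhouse url html (detect_greenhouse url html)

-- ===== LEMMAS AND PROOFS =====

-- chars-level model of split('/') (proof helper only)
def splitC : List Char → List (List Char)
  | [] => [[]]
  | c :: t => if c = '/' then [] :: splitC t else (splitC t).modifyHead (c :: ·)

-- chars-level value of B's token computation (proof helper only)
def btokC (s : List Char) : Option (List Char) :=
  let g := "greenhouse".toList
  let i := PySem.Chars.find s g
  if i ≠ -1 then
    let j := PySem.Chars.findFrom s ['/'] i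
    if j ≠ -1 then
      let k := PySem.Chars.findFrom s ['/'] (j + 1)
      some (if k = -1 then PySem.Chars.slice s (some (j + 1)) none
            else PySem.Chars.slice s (some (j + 1)) (some k))
    else none
  else none

-- chars-level value of A's scan (proof helper only)
def pairFindC (l : List (List Char)) : Option (List Char) :=
  ((l.zip l.tail).find? (fun p => PySem.Chars.isIn "greenhouse".toList p.1)).map (·.2)

lemma ghLoopA_eq_find (parts : List String) :
    ∀ (l : List String) (k : Nat), parts.drop k = l →
    ghLoopA parts (PySem.List.enumerate l (k : Int)) =
      ((l.zip (parts.drop (k + 1))).find?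
        (fun p => PySem.Str.isIn "greenhouse" p.1)).map (·.2) := by
  intro l
  induction l with
  | nil => intro k _; simp [PySem.List.enumerate_nil, ghLoopA]
  | cons p rest ih =>
    intro k hk
    have hrest : parts.drop (k + 1) = rest := by
      rw [← List.drop_drop, hk]; rfl
    rw [PySem.List.enumerate_cons, ghLoopA]
    by_cases hg : PySem.Str.isIn "greenhouse" p = true
    · have hgC : PySem.Chars.isIn ['g', 'r', 'e', 'e', 'n', 'h', 'o', 'u', 's', 'e'] p.toList = true := hg
      by_cases hlt : (k : Int) + 1 < (parts.length : Int)
      · have hlen : k + 1 < parts.length := by exact_mod_cast hlt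
        have hne : rest ≠ [] := by
          intro h0
          have := congrArg List.length hrest
          simp [h0] at this
          omega
        obtain ⟨q, rest', rfl⟩ := List.exists_cons_of_ne_nil hne
        have hget : PySem.List.pyGet? parts ((k : Int) + 1) = some q := by
          have h1 : ((k : Int) + 1) = ((k + 1 : Nat) : Int) := by push_cast; ring
          have h2 : parts[k + 1]? = some q := by
            rw [← List.head?_drop, hrest]; rfl
          rw [h1, PySem.List.pyGet?_natCast, h2]
        simp [hgC, hlt, hrest, hget]
      · have hlen : parts.length ≤ k + 1 := by exact_mod_cast not_lt.mp hlt
        have hre : rest = [] := by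
          have := congrArg List.length hrest
          cases rest with
          | nil => rfl
          | cons a b => simp at this; omega
        subst hre
        simp [hgC, hlt, hrest, ghLoopA, PySem.List.enumerate_nil]
    · have hg' : PySem.Str.isIn "greenhouse" p = false := by
        cases h : PySem.Str.isIn "greenhouse" p
        · rfl
        · exact absurd h hg
      have hgC : PySem.Chars.isIn ['g', 'r', 'e', 'e', 'n', 'h', 'o', 'u', 's', 'e'] p.toList = false := hg'
      have h1 : ((k : Int) + 1) = ((k + 1 : Nat) : Int) := by push_cast; ring
      rw [if_neg (by simp [hgC])]
      rw [h1, ih (k + 1) hrest]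
      cases hre : rest with
      | nil => simp [hrest, hre]
      | cons q rest' =>
        have hrest2 : parts.drop (k + 1 + 1) = rest' := by
          rw [← List.drop_drop, hrest, hre]; rfl
        rw [hrest, hre, hrest2]
        simp [hgC]

lemma modifyHead_self_id {α : Type} (l : List α) : List.modifyHead (fun x => x) l = l := by
  cases l <;> simp

lemma splitC_ne_nil (s : List Char) : splitC s ≠ [] := by
  induction s with
  | nil => simp [splitC]
  | cons c t ih =>
    simp only [splitC]
    split
    · simp
    · intro h
      apply ih
      have := congrArg List.length h
      simpa using this

-- singleton prefix / infix characterisations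
lemma singleton_prefix_iff (c : Char) (t : List Char) :
    [c] <+: t ↔ ∃ t', t = c :: t' := by
  cases t with
  | nil => simp
  | cons a b =>
    constructor
    · intro h
      obtain ⟨r, hr⟩ := h
      simp at hr
      exact ⟨b, by simp [hr.1]⟩
    · rintro ⟨t', ht⟩
      simp at ht
      exact ⟨b, by simp [ht.1]⟩

lemma singleton_infix_iff (c : Char) (t : List Char) :
    [c] <:+: t ↔ c ∈ t := by
  constructor
  · intro h; exact h.subset (by simp)
  · intro h
    obtain ⟨a, b, rfl⟩ := List.append_of_mem h
    exact ⟨a, b, by simp⟩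

-- Chars.find is characterised by "occurrence here, none earlier"
lemma find_eq_of (s sub : List Char) (n : Nat)
    (hocc : sub <+: s.drop n) (hmin : ∀ m < n, ¬ sub <+: s.drop m) :
    PySem.Chars.find s sub = (n : Int) := by
  have hinf : sub <:+: s :=
    List.infix_iff_prefix_suffix.mpr ⟨s.drop n, hocc, List.drop_suffix n s⟩
  have h0 : 0 ≤ PySem.Chars.find s sub := (PySem.Chars.find_nonneg_iff s sub).mpr hinf
  obtain ⟨h1, h2⟩ := PySem.Chars.find_spec h0
  have hn1 : ¬ ((PySem.Chars.find s sub).toNat < n) := fun h => hmin _ h h1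
  have hn2 : ¬ (n < (PySem.Chars.find s sub).toNat) := fun h => h2 n h hocc
  omega

lemma splitOn_go_eq :
    ∀ (l : List Char) (fuel : Nat), l.length ≤ fuel → ∀ (cur : List Char) (acc : List (List Char)),
    PySem.Chars.splitOn.go ['/'] fuel l cur acc =
      acc.reverse ++ (splitC l).modifyHead (cur.reverse ++ ·) := by
  intro l
  induction l with
  | nil =>
    intro fuel _ cur acc
    cases fuel <;> simp [PySem.Chars.splitOn.go, splitC]
  | cons c t ih =>
    intro fuel hf cur acc
    cases fuel with
    | zero => simp at hf
    | succ f =>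
      by_cases hc : c = '/'
      · subst hc
        have hpre : List.isPrefixOf ['/'] ('/' :: t) = true := by simp [List.isPrefixOf]
        rw [show PySem.Chars.splitOn.go ['/'] (f + 1) ('/' :: t) cur acc =
              PySem.Chars.splitOn.go ['/'] f t [] (cur.reverse :: acc) by
            simp [PySem.Chars.splitOn.go, hpre]]
        rw [ih f (by simpa using hf) [] (cur.reverse :: acc)]
        simp [splitC, modifyHead_self_id]
      · have hpre : List.isPrefixOf ['/'] (c :: t) = false := by
          simp [List.isPrefixOf]
          exact fun h => absurd h.symm hc
        rw [show PySem.Chars.splitOn.go ['/'] (f + 1) (c :: t) cur acc =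
              PySem.Chars.splitOn.go ['/'] f t (c :: cur) acc by
            simp [PySem.Chars.splitOn.go, hpre]]
        rw [ih f (by simpa using hf) (c :: cur) acc]
        rw [show splitC (c :: t) = (splitC t).modifyHead (c :: ·) by simp [splitC, hc]]
        rw [List.modifyHead_modifyHead]
        congr 1
        congr 1
        funext x
        simp

lemma splitOn_eq_splitC (s : List Char) :
    PySem.Chars.splitOn s ['/'] = splitC s := by
  unfold PySem.Chars.splitOn
  rw [splitOn_go_eq s (s.length + 1) (by omega) [] []]
  simp only [List.reverse_nil, List.nil_append]
  exact modifyHead_self_id _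

lemma splitC_no_sep (s : List Char) (h : '/' ∉ s) : splitC s = [s] := by
  induction s with
  | nil => simp [splitC]
  | cons c t ih =>
    have hc : ¬ c = '/' := fun hh => h (by simp [hh])
    rw [show splitC (c :: t) = (splitC t).modifyHead (c :: ·) by simp [splitC, hc]]
    rw [ih (fun hm => h (by simp [hm]))]
    simp

lemma splitC_sep (a b : List Char) (ha : '/' ∉ a) :
    splitC (a ++ '/' :: b) = a :: splitC b := by
  induction a with
  | nil => simp [splitC]
  | cons c t ih =>
    have hc : ¬ c = '/' := fun hh => ha (by simp [hh])
    have : (c :: t) ++ '/' :: b = c :: (t ++ '/' :: b) := by simp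
    rw [this]
    rw [show splitC (c :: (t ++ '/' :: b)) = (splitC (t ++ '/' :: b)).modifyHead (c :: ·) by
      simp [splitC, hc]]
    rw [ih (fun hm => ha (by simp [hm]))]
    simp

lemma mem_decomp (s : List Char) (h : '/' ∈ s) :
    ∃ a b, s = a ++ '/' :: b ∧ '/' ∉ a := by
  induction s with
  | nil => simp at h
  | cons c t ih =>
    by_cases hc : c = '/'
    · exact ⟨[], t, by simp [hc], by simp⟩
    · have ht : '/' ∈ t := by
        rcases List.mem_cons.mp h with h1 | h1
        · exact absurd h1.symm hc
        · exact h1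
      obtain ⟨a, b, rfl, hna⟩ := ih ht
      refine ⟨c :: a, b, by simp, ?_⟩
      intro hm
      rcases List.mem_cons.mp hm with h1 | h1
      · exact hc h1.symm
      · exact hna h1

-- no occurrence of "greenhouse" can start at or before a.length when a does not contain it
lemma no_occ_in_a (a b : List Char) (ha : PySem.Chars.isIn "greenhouse".toList a = false) :
    ∀ q ≤ a.length, ¬ "greenhouse".toList <+: (a ++ '/' :: b).drop q := by
  intro q hq hpre
  have hdrop : (a ++ '/' :: b).drop q = a.drop q ++ '/' :: b :=
    List.drop_append_of_le_length hq
  rw [hdrop] at hpre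
  obtain ⟨r, hr⟩ := hpre
  by_cases hfit : q + 10 ≤ a.length
  · -- the occurrence fits inside a
    have hlen : 10 ≤ (a.drop q).length := by simp; omega
    have htake : (a.drop q).take 10 = "greenhouse".toList := by
      have := congrArg (List.take 10) hr
      rw [List.take_append_of_le_length hlen] at this
      simpa using this.symm
    have hpre2 : ("greenhouse".toList : List Char) <+: a.drop q :=
      htake ▸ List.take_prefix 10 (a.drop q)
    have : PySem.Chars.isIn "greenhouse".toList a = true := by
      rw [PySem.Chars.isIn_iff_infix]
      exact List.infix_iff_prefix_suffix.mpr ⟨a.drop q, hpre2, List.drop_suffix q a⟩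
    rw [this] at ha; exact absurd ha (by simp)
  · -- the occurrence would straddle the '/' at position a.length - q
    have hm : a.length - q < 10 := by omega
    have hlenD : (a.drop q).length = a.length - q := by simp
    have hL : ("greenhouse".toList ++ r)[a.length - q]'(by simp; omega) = '/' := by
      rw [List.getElem_of_eq hr]
      rw [List.getElem_append_right (by omega)]
      simp [hlenD]
    have hG : ("greenhouse".toList ++ r)[a.length - q]'(by simp; omega) =
        ("greenhouse".toList)[a.length - q]'(by simpa using hm) :=
      List.getElem_append_left (by simpa using hm)
    have : '/' ∈ "greenhouse".toList := by
      rw [← hL, hG]; exact List.getElem_mem _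
    revert this; decide

-- first '/' in (a ++ '/' :: b) viewed from any q inside a
lemma first_slash (a b : List Char) (ha : '/' ∉ a) (q : Nat) (hq : q ≤ a.length) :
    PySem.Chars.find ((a ++ '/' :: b).drop q) ['/'] = ((a.length - q : Nat) : Int) := by
  apply find_eq_of
  · rw [List.drop_drop]
    have : q + (a.length - q) = a.length := by omega
    rw [this, List.drop_left]
    exact ⟨b, rfl⟩
  · intro m hm hpre
    rw [List.drop_drop] at hpre
    have hqm : q + m ≤ a.length := by omega
    rw [List.drop_append_of_le_length hqm] at hpre
    obtain ⟨t', ht'⟩ := (singleton_prefix_iff _ _).mp hpre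
    have hlt : q + m < a.length := by omega
    rw [List.drop_eq_getElem_cons hlt] at ht'
    have hhead := congrArg List.head? ht'
    simp only [List.cons_append, List.head?_cons, Option.some.injEq] at hhead
    exact ha (hhead ▸ List.getElem_mem hlt)

lemma pairFindC_cons (x y : List Char) (t : List (List Char)) :
    pairFindC (x :: y :: t) =
      if PySem.Chars.isIn "greenhouse".toList x then some y else pairFindC (y :: t) := by
  by_cases hx : PySem.Chars.isIn "greenhouse".toList x = true
  · have hxC : PySem.Chars.isIn ['g', 'r', 'e', 'e', 'n', 'h', 'o', 'u', 's', 'e'] x = true := hx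
    simp [pairFindC, hxC]
  · have hx' : PySem.Chars.isIn "greenhouse".toList x = false := by
      cases hxx : PySem.Chars.isIn "greenhouse".toList x
      · rfl
      · exact absurd hxx hx
    have hxC : PySem.Chars.isIn ['g', 'r', 'e', 'e', 'n', 'h', 'o', 'u', 's', 'e'] x = false := hx'
    simp [pairFindC, hxC]

lemma drop_shift (a b : List Char) (m : Nat) :
    (a ++ '/' :: b).drop (a.length + 1 + m) = b.drop m := by
  have h1 : a.length + 1 + m = a.length + (1 + m) := by omega
  rw [h1, ← List.drop_drop, List.drop_left]
  have h2 : 1 + m = m + 1 := by omega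
  rw [h2, List.drop_succ_cons]

-- a greenhouse occurrence in (a ++ '/' :: b) with none inside a sits at a.length+1 + (its position in b)
lemma find_g_shift (a b : List Char) (hg : PySem.Chars.isIn "greenhouse".toList a = false) :
    PySem.Chars.find (a ++ '/' :: b) "greenhouse".toList =
      if PySem.Chars.find b "greenhouse".toList = -1 then -1
      else ((a.length + 1 : Nat) : Int) + PySem.Chars.find b "greenhouse".toList := by
  have hnocc := no_occ_in_a a b hg
  by_cases hb : PySem.Chars.find b "greenhouse".toList = -1
  · rw [if_pos hb]
    rw [PySem.Chars.find_eq_neg_one_iff] at hb ⊢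
    intro hinf
    apply hb
    have hisIn : PySem.Chars.isIn "greenhouse".toList (a ++ '/' :: b) = true :=
      (PySem.Chars.isIn_iff_infix _ _).mpr hinf
    obtain ⟨j, hj⟩ := (PySem.Chars.exists_prefix_drop_iff_isIn _ _).mpr hisIn
    have hja : ¬ j ≤ a.length := fun hle => hnocc j hle hj
    have hj' : "greenhouse".toList <+: b.drop (j - (a.length + 1)) := by
      have : a.length + 1 + (j - (a.length + 1)) = j := by omega
      rw [← drop_shift a b (j - (a.length + 1)), this]
      exact hj
    rw [← PySem.Chars.isIn_iff_infix]
    exact (PySem.Chars.exists_prefix_drop_iff_isIn _ _).mp ⟨_, hj'⟩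
  · rw [if_neg hb]
    have hbge : 0 ≤ PySem.Chars.find b "greenhouse".toList := by
      have := PySem.Chars.neg_one_le_find b "greenhouse".toList
      omega
    set p := (PySem.Chars.find b "greenhouse".toList).toNat with hp
    have hpv : PySem.Chars.find b "greenhouse".toList = (p : Int) := (Int.toNat_of_nonneg hbge).symm
    obtain ⟨hocc, hmin⟩ := PySem.Chars.find_spec hbge
    have : PySem.Chars.find (a ++ '/' :: b) "greenhouse".toList = ((a.length + 1 + p : Nat) : Int) := by
      apply find_eq_of
      · rw [drop_shift]; exact hocc
      · intro m hm hpre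
        by_cases hma : m ≤ a.length
        · exact hnocc m hma hpre
        · have hm' : m - (a.length + 1) < p := by omega
          apply hmin _ hm'
          have : a.length + 1 + (m - (a.length + 1)) = m := by omega
          rw [← this, drop_shift] at hpre
          exact hpre
    rw [this, hpv]
    push_cast
    ring

lemma btok_hit (a b : List Char) (ha : '/' ∉ a)
    (hg : PySem.Chars.isIn "greenhouse".toList a = true) :
    btokC (a ++ '/' :: b) = pairFindC (splitC (a ++ '/' :: b)) := by
  have hslen : (a ++ '/' :: b).length = a.length + 1 + b.length := by simp; omega
  -- the first occurrence of "greenhouse" starts inside a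
  obtain ⟨pre, suf, hpre⟩ := (PySem.Chars.isIn_iff_infix _ _).mp hg
  have hql : pre.length ≤ a.length := by
    have := congrArg List.length hpre; simp at this; omega
  have hadrop : a.drop pre.length = "greenhouse".toList ++ suf := by
    have : (pre ++ "greenhouse".toList ++ suf).drop pre.length = "greenhouse".toList ++ suf := by
      rw [List.append_assoc, List.drop_left]
    rw [← this, hpre]
  have hocc : "greenhouse".toList <+: (a ++ '/' :: b).drop pre.length := by
    rw [List.drop_append_of_le_length hql, hadrop, List.append_assoc]
    exact List.prefix_append _ _
  have hginf : "greenhouse".toList <:+: (a ++ '/' :: b) :=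
    List.infix_iff_prefix_suffix.mpr ⟨_, hocc, List.drop_suffix _ _⟩
  have hi0 : 0 ≤ PySem.Chars.find (a ++ '/' :: b) "greenhouse".toList :=
    (PySem.Chars.find_nonneg_iff _ _).mpr hginf
  set i := (PySem.Chars.find (a ++ '/' :: b) "greenhouse".toList).toNat with hidef
  have hiv : PySem.Chars.find (a ++ '/' :: b) "greenhouse".toList = (i : Int) :=
    (Int.toNat_of_nonneg hi0).symm
  have hia : i ≤ a.length := by
    obtain ⟨_, hmin⟩ := PySem.Chars.find_spec hi0
    by_contra hcon
    exact hmin pre.length (by omega) hocc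
  -- j = a.length
  have hj : PySem.Chars.findFrom (a ++ '/' :: b) ['/'] ((i : Nat) : Int) = ((a.length : Nat) : Int) := by
    rw [PySem.Chars.findFrom_natCast _ _ i (by omega)]
    rw [first_slash a b ha i hia]
    have hne : ((a.length - i : Nat) : Int) ≠ -1 := by omega
    rw [if_neg hne]
    omega
  have hane : ((a.length : Nat) : Int) ≠ -1 := by omega
  -- k
  have hcast1 : ((a.length : Nat) : Int) + 1 = ((a.length + 1 : Nat) : Int) := by push_cast; ring
  have hdropL : (a ++ '/' :: b).drop (a.length + 1) = b := by
    have h0 := drop_shift a b 0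
    rw [List.drop_zero] at h0
    have h1 : a.length + 1 + 0 = a.length + 1 := by omega
    rw [h1] at h0
    exact h0
  have hk : PySem.Chars.findFrom (a ++ '/' :: b) ['/'] (((a.length : Nat) : Int) + 1) =
      if PySem.Chars.find b ['/'] = -1 then -1
      else ((a.length + 1 : Nat) : Int) + PySem.Chars.find b ['/'] := by
    rw [hcast1, PySem.Chars.findFrom_natCast _ _ (a.length + 1) (by omega)]
    rw [hdropL]
  -- right-hand side
  rw [splitC_sep a b ha]
  by_cases hbs : '/' ∈ b
  · obtain ⟨a2, b2, rfl, ha2⟩ := mem_decomp b hbs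
    have hfb : PySem.Chars.find (a2 ++ '/' :: b2) ['/'] = ((a2.length : Nat) : Int) := by
      have := first_slash a2 b2 ha2 0 (by omega)
      simp at this
      exact this
    have hsplitb : splitC (a2 ++ '/' :: b2) = a2 :: splitC b2 := splitC_sep a2 b2 ha2
    have htok : PySem.Chars.slice (a ++ '/' :: (a2 ++ '/' :: b2))
        (some (((a.length : Nat) : Int) + 1))
        (some (((a.length + 1 : Nat) : Int) + ((a2.length : Nat) : Int))) = a2 := by
      simp only [PySem.Chars.slice_eq_listSlice]
      rw [hcast1, PySem.List.slice_natCast_add, hdropL, List.take_left]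
    rw [hsplitb, pairFindC_cons, if_pos hg]
    simp only [btokC]
    rw [hiv, hj, hk, hfb]
    rw [if_neg (show ¬ ((a2.length : Int) = -1) by omega)]
    rw [if_pos (show ((i : Nat) : Int) ≠ -1 by omega)]
    rw [if_pos (show ((a.length : Nat) : Int) ≠ -1 by omega)]
    rw [if_neg (show ¬ (((a.length + 1 : Nat) : Int) + ((a2.length : Nat) : Int) = -1) by push_cast; omega)]
    rw [htok]
  · have hfb : PySem.Chars.find b ['/'] = -1 := by
      rw [PySem.Chars.find_eq_neg_one_iff]
      intro hinf
      exact hbs ((singleton_infix_iff _ _).mp hinf)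
    have htok : PySem.List.slice (a ++ '/' :: b) (some (((a.length : Nat) : Int) + 1)) none = b := by
      rw [hcast1, PySem.List.slice_from_natCast, hdropL]
    rw [splitC_no_sep b hbs, pairFindC_cons, if_pos hg]
    simp only [btokC]
    rw [hiv, hj, hk, hfb]
    simp [htok, hane]

lemma btok_shift (a b : List Char) (_ha : '/' ∉ a)
    (hg : PySem.Chars.isIn "greenhouse".toList a = false) :
    btokC (a ++ '/' :: b) = btokC b := by
  have hslen : (a ++ '/' :: b).length = a.length + 1 + b.length := by simp; omega
  have hshift := find_g_shift a b hg
  by_cases hb : PySem.Chars.find b "greenhouse".toList = -1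
  · rw [if_pos hb] at hshift
    have hshift' : PySem.Chars.find (a ++ '/' :: b) ['g', 'r', 'e', 'e', 'n', 'h', 'o', 'u', 's', 'e'] = -1 := hshift
    have hb' : PySem.Chars.find b ['g', 'r', 'e', 'e', 'n', 'h', 'o', 'u', 's', 'e'] = -1 := hb
    simp only [btokC]
    rw [hshift, hb]
    simp
  · rw [if_neg hb] at hshift
    have hbge : 0 ≤ PySem.Chars.find b "greenhouse".toList := by
      have := PySem.Chars.neg_one_le_find b "greenhouse".toList
      omega
    set p := (PySem.Chars.find b "greenhouse".toList).toNat with hpdef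
    have hpv : PySem.Chars.find b "greenhouse".toList = (p : Int) := (Int.toNat_of_nonneg hbge).symm
    have hpb : p ≤ b.length := by
      have := PySem.Chars.find_le_length b "greenhouse".toList
      omega
    have hfs : PySem.Chars.find (a ++ '/' :: b) "greenhouse".toList = ((a.length + 1 + p : Nat) : Int) := by
      rw [hshift, hpv]; push_cast; ring
    have hpv' : PySem.Chars.find b ['g', 'r', 'e', 'e', 'n', 'h', 'o', 'u', 's', 'e'] = ((p : Nat) : Int) := hpv
    have hfs' : PySem.Chars.find (a ++ '/' :: b) ['g', 'r', 'e', 'e', 'n', 'h', 'o', 'u', 's', 'e'] = ((a.length + 1 + p : Nat) : Int) := hfs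
    -- the j's
    have hjs : PySem.Chars.findFrom (a ++ '/' :: b) ['/'] ((a.length + 1 + p : Nat) : Int) =
        if PySem.Chars.find (b.drop p) ['/'] = -1 then -1
        else ((a.length + 1 + p : Nat) : Int) + PySem.Chars.find (b.drop p) ['/'] := by
      rw [PySem.Chars.findFrom_natCast _ _ _ (by omega), drop_shift]
    have hjb : PySem.Chars.findFrom b ['/'] ((p : Nat) : Int) =
        if PySem.Chars.find (b.drop p) ['/'] = -1 then -1
        else ((p : Nat) : Int) + PySem.Chars.find (b.drop p) ['/'] := by
      rw [PySem.Chars.findFrom_natCast _ _ _ hpb]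
    by_cases hsl : PySem.Chars.find (b.drop p) ['/'] = -1
    · rw [if_pos hsl] at hjs hjb
      simp only [btokC]
      rw [hfs, hpv, hjs, hjb]
      rw [if_pos (show ((a.length + 1 + p : Nat) : Int) ≠ -1 by omega)]
      rw [if_pos (show ((p : Nat) : Int) ≠ -1 by omega)]
      simp
    · rw [if_neg hsl] at hjs hjb
      have h0sl : 0 ≤ PySem.Chars.find (b.drop p) ['/'] := by
        have := PySem.Chars.neg_one_le_find (b.drop p) ['/']
        omega
      set q := (PySem.Chars.find (b.drop p) ['/']).toNat with hqdef
      have hqv : PySem.Chars.find (b.drop p) ['/'] = (q : Int) := (Int.toNat_of_nonneg h0sl).symm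
      rw [hqv] at hjs hjb
      -- the slash found is a real position: p + q < b.length
      have hpq : p + q < b.length := by
        obtain ⟨hocc, _⟩ := PySem.Chars.find_spec h0sl
        rw [← hqdef] at hocc
        rw [List.drop_drop] at hocc
        obtain ⟨t', ht'⟩ := (singleton_prefix_iff _ _).mp hocc
        have hlen := congrArg List.length ht'
        simp at hlen
        omega
      -- the k's
      have hks : PySem.Chars.findFrom (a ++ '/' :: b) ['/'] (((a.length + 1 + p : Nat) : Int) + ((q : Nat) : Int) + 1) =
          if PySem.Chars.find (b.drop (p + q + 1)) ['/'] = -1 then -1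
          else ((a.length + 1 + (p + q + 1) : Nat) : Int) + PySem.Chars.find (b.drop (p + q + 1)) ['/'] := by
        have hc : ((a.length + 1 + p : Nat) : Int) + ((q : Nat) : Int) + 1 = ((a.length + 1 + (p + q + 1) : Nat) : Int) := by
          push_cast; ring
        rw [hc, PySem.Chars.findFrom_natCast _ _ _ (by omega), drop_shift]
      have hkb : PySem.Chars.findFrom b ['/'] (((p : Nat) : Int) + ((q : Nat) : Int) + 1) =
          if PySem.Chars.find (b.drop (p + q + 1)) ['/'] = -1 then -1
          else ((p + q + 1 : Nat) : Int) + PySem.Chars.find (b.drop (p + q + 1)) ['/'] := by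
        have hc : ((p : Nat) : Int) + ((q : Nat) : Int) + 1 = ((p + q + 1 : Nat) : Int) := by
          push_cast; ring
        rw [hc, PySem.Chars.findFrom_natCast _ _ _ (by omega)]
      by_cases hk2 : PySem.Chars.find (b.drop (p + q + 1)) ['/'] = -1
      · rw [if_pos hk2] at hks hkb
        have hts : PySem.List.slice (a ++ '/' :: b)
            (some (((a.length + 1 + p : Nat) : Int) + ((q : Nat) : Int) + 1)) none = b.drop (p + q + 1) := by
          have hc : ((a.length + 1 + p : Nat) : Int) + ((q : Nat) : Int) + 1 = ((a.length + 1 + (p + q + 1) : Nat) : Int) := by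
            push_cast; ring
          rw [hc, PySem.List.slice_from_natCast, drop_shift]
        have htb : PySem.List.slice b
            (some (((p : Nat) : Int) + ((q : Nat) : Int) + 1)) none = b.drop (p + q + 1) := by
          have hc : ((p : Nat) : Int) + ((q : Nat) : Int) + 1 = ((p + q + 1 : Nat) : Int) := by
            push_cast; ring
          rw [hc, PySem.List.slice_from_natCast]
        simp only [btokC]
        rw [hfs, hpv, hjs, hjb, hks, hkb]
        rw [if_pos (show ((a.length + 1 + p : Nat) : Int) ≠ -1 by omega)]
        rw [if_pos (show ((p : Nat) : Int) ≠ -1 by omega)]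
        rw [if_pos (show ((a.length + 1 + p : Nat) : Int) + ((q : Nat) : Int) ≠ -1 by push_cast; omega)]
        rw [if_pos (show ((p : Nat) : Int) + ((q : Nat) : Int) ≠ -1 by omega)]
        rw [if_pos (show (-1 : Int) = -1 from rfl), if_pos (show (-1 : Int) = -1 from rfl)]
        simp only [PySem.Chars.slice_eq_listSlice]
        rw [hts, htb]
      · rw [if_neg hk2] at hks hkb
        have h0k2 : 0 ≤ PySem.Chars.find (b.drop (p + q + 1)) ['/'] := by
          have := PySem.Chars.neg_one_le_find (b.drop (p + q + 1)) ['/']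
          omega
        set r := (PySem.Chars.find (b.drop (p + q + 1)) ['/']).toNat with hrdef
        have hrv : PySem.Chars.find (b.drop (p + q + 1)) ['/'] = (r : Int) := (Int.toNat_of_nonneg h0k2).symm
        rw [hrv] at hks hkb
        have hts : PySem.List.slice (a ++ '/' :: b)
            (some (((a.length + 1 + p : Nat) : Int) + ((q : Nat) : Int) + 1))
            (some (((a.length + 1 + (p + q + 1) : Nat) : Int) + ((r : Nat) : Int))) =
            (b.drop (p + q + 1)).take r := by
          have hc1 : ((a.length + 1 + p : Nat) : Int) + ((q : Nat) : Int) + 1 = ((a.length + 1 + (p + q + 1) : Nat) : Int) := by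
            push_cast; ring
          rw [hc1, PySem.List.slice_natCast_add, drop_shift]
        have htb : PySem.List.slice b
            (some (((p : Nat) : Int) + ((q : Nat) : Int) + 1))
            (some (((p + q + 1 : Nat) : Int) + ((r : Nat) : Int))) =
            (b.drop (p + q + 1)).take r := by
          have hc1 : ((p : Nat) : Int) + ((q : Nat) : Int) + 1 = ((p + q + 1 : Nat) : Int) := by
            push_cast; ring
          rw [hc1, PySem.List.slice_natCast_add]
        simp only [btokC]
        rw [hfs, hpv, hjs, hjb, hks, hkb]
        rw [if_pos (show ((a.length + 1 + p : Nat) : Int) ≠ -1 by omega)]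
        rw [if_pos (show ((p : Nat) : Int) ≠ -1 by omega)]
        rw [if_pos (show ((a.length + 1 + p : Nat) : Int) + ((q : Nat) : Int) ≠ -1 by push_cast; omega)]
        rw [if_pos (show ((p : Nat) : Int) + ((q : Nat) : Int) ≠ -1 by omega)]
        rw [if_neg (show ¬ (((a.length + 1 + (p + q + 1) : Nat) : Int) + ((r : Nat) : Int) = -1) by push_cast; omega)]
        rw [if_neg (show ¬ (((p + q + 1 : Nat) : Int) + ((r : Nat) : Int) = -1) by push_cast; omega)]
        simp only [PySem.Chars.slice_eq_listSlice]
        rw [hts, htb]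

lemma btok_main : ∀ (n : Nat) (s : List Char), s.length ≤ n → btokC s = pairFindC (splitC s) := by
  intro n
  induction n with
  | zero =>
    intro s hs
    have : s = [] := List.eq_nil_of_length_eq_zero (by omega)
    subst this
    decide
  | succ m ih =>
    intro s hs
    by_cases hmem : '/' ∈ s
    · obtain ⟨a, b, rfl, ha⟩ := mem_decomp s hmem
      by_cases hg : PySem.Chars.isIn "greenhouse".toList a = true
      · exact btok_hit a b ha hg
      · have hg' : PySem.Chars.isIn "greenhouse".toList a = false := by
          cases hgg : PySem.Chars.isIn "greenhouse".toList a
          · rfl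
          · exact absurd hgg hg
        have hlen : b.length ≤ m := by
          have := hs; simp at this; omega
        obtain ⟨y, t, hyt⟩ := List.exists_cons_of_ne_nil (splitC_ne_nil b)
        rw [btok_shift a b ha hg', splitC_sep a b ha, hyt, pairFindC_cons, if_neg (by simp only [Bool.not_eq_true]; exact hg'), ← hyt]
        exact ih b hlen
    · -- no '/' in s: both sides yield none
      rw [splitC_no_sep s hmem]
      have hrhs : pairFindC [s] = none := by simp [pairFindC]
      rw [hrhs]
      by_cases hf : PySem.Chars.find s "greenhouse".toList = -1
      · have hf' : PySem.Chars.find s ['g', 'r', 'e', 'e', 'n', 'h', 'o', 'u', 's', 'e'] = -1 := hf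
        simp [btokC, hf']
      · have h0 : 0 ≤ PySem.Chars.find s "greenhouse".toList := by
          have := PySem.Chars.neg_one_le_find s "greenhouse".toList
          omega
        have hle : (PySem.Chars.find s "greenhouse".toList).toNat ≤ s.length := by
          have := PySem.Chars.find_le_length s "greenhouse".toList
          omega
        have hj : PySem.Chars.findFrom s ['/'] (PySem.Chars.find s "greenhouse".toList) = -1 := by
          rw [← Int.toNat_of_nonneg h0]
          rw [PySem.Chars.findFrom_natCast_eq_neg_one_iff s _ _ hle]
          intro hinf
          exact hmem (List.mem_of_mem_drop ((singleton_infix_iff _ _).mp hinf))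
        have hf' : ¬ PySem.Chars.find s ['g', 'r', 'e', 'e', 'n', 'h', 'o', 'u', 's', 'e'] = -1 := hf
        have hj' : PySem.Chars.findFrom s ['/'] (PySem.Chars.find s ['g', 'r', 'e', 'e', 'n', 'h', 'o', 'u', 's', 'e']) = -1 := hj
        simp [btokC, hf', hj']

-- the A-side scan over P : List String, pushed down to lists of characters
lemma tokenA_toList (P : List String) :
    (((P.zip P.tail).find? (fun p => PySem.Str.isIn "greenhouse" p.1)).map (·.2)).map String.toList =
      pairFindC (P.map String.toList) := by
  unfold pairFindC
  have hzip : (P.map String.toList).zip (P.map String.toList).tail =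
      (P.zip P.tail).map (Prod.map String.toList String.toList) := by
    rw [← List.map_tail, List.zip_map]
  rw [hzip, List.find?_map]
  have hpred : (fun p => PySem.Chars.isIn "greenhouse".toList p.1) ∘ Prod.map String.toList String.toList =
      fun p : String × String => PySem.Str.isIn "greenhouse" p.1 := by
    funext p
    simp [PySem.Str.isIn_eq]
  rw [hpred]
  cases h : (P.zip P.tail).find? (fun p => PySem.Str.isIn "greenhouse" p.1) <;> simp

-- the B-side index computation, pushed down to lists of characters
lemma tokenB_toList (url : String) :
    ((if PySem.Str.find url "greenhouse" ≠ -1 then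
        if PySem.Str.findFrom url "/" (PySem.Str.find url "greenhouse") ≠ -1 then
          some (if PySem.Str.findFrom url "/" (PySem.Str.findFrom url "/" (PySem.Str.find url "greenhouse") + 1) = -1
                then PySem.Str.slice url (some (PySem.Str.findFrom url "/" (PySem.Str.find url "greenhouse") + 1)) none
                else PySem.Str.slice url (some (PySem.Str.findFrom url "/" (PySem.Str.find url "greenhouse") + 1))
                       (some (PySem.Str.findFrom url "/" (PySem.Str.findFrom url "/" (PySem.Str.find url "greenhouse") + 1))))
        else none
      else none : Option String)).map String.toList = btokC url.toList := by
  simp only [btokC, PySem.Str.find_eq, PySem.Str.findFrom_eq,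
    show ("/" : String).toList = ['/'] from rfl]
  split
  · split
    · simp only [Option.map_some]
      congr 1
      split <;> rw [PySem.Str.toList_slice]
    · rfl
  · rfl

lemma option_toList_inj (o₁ o₂ : Option String)
    (h : o₁.map String.toList = o₂.map String.toList) : o₁ = o₂ := by
  cases o₁ <;> cases o₂ <;> simp_all [String.toList_inj]

-- ===== VERDICT (by name: the statement is the Claim_ definition above) =====
theorem detect_greenhouse_spec : Claim_equal_detect_greenhouse := by
  intro url html _ _
  unfold Spec_detect_greenhouse detect_greenhouse detect_greenhouse_alt
  split
  · -- the guard fired in both programs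
    have h2 : PySem.Chars.split? url.toList "/".toList =
        some (PySem.Chars.splitOn url.toList ['/']) := by
      rw [show ("/" : String).toList = ['/'] from rfl]
      simp [PySem.Chars.split?]
    cases hP : PySem.Str.split? url "/" with
    | none =>
      exfalso
      have hsp := PySem.Str.split?_map url "/"
      rw [hP, h2] at hsp
      simp at hsp
    | some P =>
      have hmap : P.map String.toList = splitC url.toList := by
        have hsp := PySem.Str.split?_map url "/"
        rw [hP, h2] at hsp
        simp at hsp
        rw [hsp, splitOn_eq_splitC]
      have hA := ghLoopA_eq_find P P 0 rfl
      simp only [Nat.cast_zero, Nat.zero_add, List.drop_one] at hA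
      have hAtok : (ghLoopA P (PySem.List.enumerate P)).map String.toList =
          pairFindC (splitC url.toList) := by
        rw [hA, ← hmap]
        exact tokenA_toList P
      have hBtok := tokenB_toList url
      have hmain := btok_main url.toList.length url.toList le_rfl
      have heq : ghLoopA P (PySem.List.enumerate P) =
          (if PySem.Str.find url "greenhouse" ≠ -1 then
            if PySem.Str.findFrom url "/" (PySem.Str.find url "greenhouse") ≠ -1 then
              some (if PySem.Str.findFrom url "/" (PySem.Str.findFrom url "/" (PySem.Str.find url "greenhouse") + 1) = -1
                    then PySem.Str.slice url (some (PySem.Str.findFrom url "/" (PySem.Str.find url "greenhouse") + 1)) none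
                    else PySem.Str.slice url (some (PySem.Str.findFrom url "/" (PySem.Str.find url "greenhouse") + 1))
                           (some (PySem.Str.findFrom url "/" (PySem.Str.findFrom url "/" (PySem.Str.find url "greenhouse") + 1))))
            else none
          else none : Option String) := by
        apply option_toList_inj
        rw [hAtok, hBtok, hmain]
      simp only [Option.getD_some]
      rw [heq]
  · rfl
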